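-- pv_equiv track=rewrite | github.com/mechanicalamit/sunrise_alarm | sa_lib/alarmdb.py | parsedow
-- ===== SOURCE A (Python) =====
-- def parsedow(instr):
--     t_li = [False] * 7 # Monday = index 0, Tuesday = index 1, ...
--     instr.replace(" ", "") # remove spaces
--     instr = instr.split(",") # Make fields/tokens in place
--
--     # Lets deal with each one by one, all single digits with or without a dash in the middle
--     for fi in instr:
--         if len(fi) == 1:
--             t_li[int(fi) % 7] = True
--         if len(fi) == 3:
--             for i in range(int(fi[0]), int(fi[2])+1):
--                     t_li[int(i) % 7] = True
--
--     return t_li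
-- ===== SOURCE B (Python) =====
-- def _token_range(tok):
--     # a token contributes a closed int interval [a, b] of days (empty list if ignored)
--     if len(tok) == 1:
--         d = int(tok)
--         return [(d, d)]
--     if len(tok) == 3:
--         return [(int(tok[0]), int(tok[2]))]
--     return []
--
-- def parsedow(instr):
--     ranges = []
--     for tok in instr.split(","):
--         ranges += _token_range(tok)
--     # day d is active iff some interval [a,b] contains an i with i % 7 == d,
--     # i.e. (d - a) % 7 <= b - a  (closed form; empty when b < a)
--     return [any((d - a) % 7 <= b - a for a, b in ranges) for d in range(7)]
-- ===== Notes on version B (the rewrite author's own statement) =====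
-- stated objective: alternative
-- what changed: Instead of mutating a 7-slot boolean list in place (with an inner loop setting each day of a range), B collects per-token closed intervals and builds the result in a separate pass, deciding membership of each day d in an interval [a,b] by the closed form (d - a) % 7 <= b - a, so the inner range loop disappears.
import Mathlib
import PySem

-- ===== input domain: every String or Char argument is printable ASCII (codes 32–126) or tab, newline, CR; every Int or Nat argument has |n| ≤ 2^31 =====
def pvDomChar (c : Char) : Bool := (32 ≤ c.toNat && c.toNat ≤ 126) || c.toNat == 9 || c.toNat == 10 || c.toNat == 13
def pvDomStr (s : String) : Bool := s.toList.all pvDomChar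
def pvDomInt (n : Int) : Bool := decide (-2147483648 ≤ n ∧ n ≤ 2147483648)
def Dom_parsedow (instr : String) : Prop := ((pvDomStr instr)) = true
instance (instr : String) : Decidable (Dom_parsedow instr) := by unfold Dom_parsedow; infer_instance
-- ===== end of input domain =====

-- B replaces A's in-place mutation of a 7-slot list (inner loop per range) by collecting
-- per-token intervals and a separate membership pass using the closed form (d-a)%7 ≤ b-a.


-- ===== PORT A =====
-- body of A's for-loop over the comma-split tokens (tokens as their char lists);
-- the index int(..) % 7 lies in [0,7), so .toNat is exact
def parsedowTok (t : List Bool) (fi : List Char) : List Bool :=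
  let t1 := if PySem.Chars.len fi = 1 then
      match PySem.Int.ofChars? fi with
      | some n => t.set (PySem.Int.mod n 7).toNat true
      | none => t   -- Python raises ValueError here; excluded by Pre_parsedow
    else t
  if PySem.Chars.len fi = 3 then
    -- len(fi) = 3 ⇒ indices 0 and 2 are in range, so .getD is exact for fi[0], fi[2]
    match PySem.Int.ofChars? [fi.getD 0 ' '], PySem.Int.ofChars? [fi.getD 2 ' '] with
    | some a, some b =>
        (PySem.List.pyRange a (b + 1) 1).foldl
          (fun s i => s.set (PySem.Int.mod i 7).toNat true) t1
    | _, _ => t1   -- Python raises ValueError here; excluded by Pre_parsedow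
  else t1

def parsedow (instr : String) : List Bool :=
  (PySem.Chars.splitOn instr.toList [',']).foldl parsedowTok (List.replicate 7 false)

-- ===== PORT B =====
-- B's helper _token_range: the closed interval a token contributes ([] if ignored)
def tokRanges (tok : List Char) : List (Int × Int) :=
  if PySem.Chars.len tok = 1 then
    match PySem.Int.ofChars? tok with
    | some d => [(d, d)]
    | none => []   -- Python raises ValueError here; excluded by Pre_parsedow
  else if PySem.Chars.len tok = 3 then
    match PySem.Int.ofChars? [tok.getD 0 ' '], PySem.Int.ofChars? [tok.getD 2 ' '] with
    | some a, some b => [(a, b)]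
    | _, _ => []   -- Python raises ValueError here; excluded by Pre_parsedow
  else []

def parsedow_alt (instr : String) : List Bool :=
  let ranges := (PySem.Chars.splitOn instr.toList [',']).foldl (fun rs tok => rs ++ tokRanges tok) []
  (PySem.List.pyRange 0 7 1).map (fun d =>
    ranges.any (fun ab => decide (PySem.Int.mod (d - ab.1) 7 ≤ ab.2 - ab.1)))

-- ===== PRECONDITION & SPEC =====
-- Pre_ excludes exactly the inputs where Python A raises ValueError: a comma-split token of
-- length 1 that is not int-parseable, or one of length 3 whose first or third character is not.
def Pre_parsedow (instr : String) : Prop :=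
  ∀ tok ∈ PySem.Chars.splitOn instr.toList [','],
    (PySem.Chars.len tok = 1 → (PySem.Int.ofChars? tok).isSome = true) ∧
    (PySem.Chars.len tok = 3 →
      (PySem.Int.ofChars? [tok.getD 0 ' ']).isSome = true ∧
      (PySem.Int.ofChars? [tok.getD 2 ' ']).isSome = true)
instance (instr : String) : Decidable (Pre_parsedow instr) := by unfold Pre_parsedow; infer_instance
def pvWitness_parsedow : String := "0,1-3"
def Spec_parsedow (instr : String) (out : List Bool) : Prop := out = parsedow_alt instr
instance (instr : String) (out : List Bool) : Decidable (Spec_parsedow instr out) := by unfold Spec_parsedow; infer_instance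

-- ===== CLAIM (what is proved, stated in full; the proofs are below) =====
def Claim_equal_parsedow : Prop := ∀ (instr : String), Dom_parsedow instr → Pre_parsedow instr → Spec_parsedow instr (parsedow instr)

-- ===== LEMMAS AND PROOFS =====

-- B's membership test for day j against one interval
def covP (j : Nat) (ab : Int × Int) : Bool :=
  decide (PySem.Int.mod ((j : Int) - ab.1) 7 ≤ ab.2 - ab.1)

theorem set_getElem! (t : List Bool) (k j : Nat) (hj : j < t.length) :
    (t.set k true)[j]! = (t[j]! || decide (j = k)) := by
  rw [getElem!_pos (t.set k true) j (by simpa using hj), getElem!_pos t j hj, List.getElem_set]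
  by_cases h : k = j <;> simp [h, eq_comm]

theorem rangeStep (n : Nat) : ∀ (a b : Int), (b - a).toNat = n → ∀ (t : List Bool), t.length = 7 →
    ∀ (j : Nat), j < 7 →
    ((PySem.List.pyRange a b 1).foldl (fun s i => s.set (PySem.Int.mod i 7).toNat true) t)[j]! =
      (t[j]! || decide (PySem.Int.mod ((j : Int) - a) 7 ≤ b - 1 - a)) := by
  induction n with
  | zero =>
    intro a b hab t ht j hj
    have hba : b ≤ a := by omega
    have hdec : decide (PySem.Int.mod ((j : Int) - a) 7 ≤ b - 1 - a) = false := by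
      rw [PySem.Int.mod_eq_emod_of_pos (show (0:Int) < 7 by norm_num), decide_eq_false_iff_not]
      have := Int.emod_nonneg ((j : Int) - a) (show (7:Int) ≠ 0 by norm_num)
      omega
    rw [PySem.List.pyRange_one_eq_nil hba, List.foldl_nil, hdec, Bool.or_false]
  | succ n ih =>
    intro a b hab t ht j hj
    have hlt : a < b := by omega
    rw [PySem.List.pyRange_one_cons hlt]
    simp only [List.foldl_cons]
    rw [ih (a + 1) b (by omega) (t.set (PySem.Int.mod a 7).toNat true) (by simp [ht]) j hj]
    rw [set_getElem! t _ j (by omega)]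
    rw [Bool.or_assoc]
    congr 1
    have hm := PySem.Int.mod_eq_emod_of_pos (a := (j : Int) - a) (b := 7) (by omega)
    have hm1 := PySem.Int.mod_eq_emod_of_pos (a := (j : Int) - (a + 1)) (b := 7) (by omega)
    have hma := PySem.Int.mod_eq_emod_of_pos (a := a) (b := 7) (by omega)
    rw [Bool.or_comm, ← Bool.decide_or, decide_eq_decide, hm, hm1, hma]
    have h1 : 0 ≤ ((j : Int) - a) % 7 ∧ ((j : Int) - a) % 7 < 7 := ⟨Int.emod_nonneg _ (by omega), Int.emod_lt_of_pos _ (by omega)⟩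
    have h2 : 0 ≤ ((j : Int) - (a + 1)) % 7 ∧ ((j : Int) - (a + 1)) % 7 < 7 := ⟨Int.emod_nonneg _ (by omega), Int.emod_lt_of_pos _ (by omega)⟩
    have h3 : 0 ≤ a % 7 ∧ a % 7 < 7 := ⟨Int.emod_nonneg _ (by omega), Int.emod_lt_of_pos _ (by omega)⟩
    constructor
    · rintro (h | h) <;> omega
    · intro h
      by_cases hz : ((j : Int) - a) % 7 = 0
      · right; omega
      · left; omega

theorem rangeLen (l : List Int) : ∀ (t : List Bool),
    ((l.foldl (fun s i => s.set (PySem.Int.mod i 7).toNat true) t)).length = t.length := by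
  induction l with
  | nil => intro t; rfl
  | cons x xs ih => intro t; rw [List.foldl_cons, ih]; simp

theorem tokLen (t : List Bool) (fi : List Char) : (parsedowTok t fi).length = t.length := by
  unfold parsedowTok
  split_ifs <;> (try split) <;> (try split) <;>
    simp only [rangeLen, List.length_set]

theorem tokStep (t : List Bool) (ht : t.length = 7) (fi : List Char) (j : Nat) (hj : j < 7) :
    (parsedowTok t fi)[j]! = (t[j]! || (tokRanges fi).any (covP j)) := by
  by_cases h1 : PySem.Chars.len fi = 1
  · have h3 : ¬ PySem.Chars.len fi = 3 := by rw [PySem.Chars.len_eq] at h1 ⊢; omega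
    simp only [parsedowTok, tokRanges, eq_true h1, eq_false h3, if_true, if_false]
    cases hof : PySem.Int.ofChars? fi with
    | none => simp
    | some n =>
      simp only [List.any_cons, List.any_nil, Bool.or_false]
      rw [set_getElem! t _ j (by omega)]
      congr 1
      simp only [covP]
      rw [decide_eq_decide]
      have hm := PySem.Int.mod_eq_emod_of_pos (a := (j : Int) - n) (b := 7) (by omega)
      have hmn := PySem.Int.mod_eq_emod_of_pos (a := n) (b := 7) (by omega)
      rw [hm, hmn]
      have h1b : 0 ≤ ((j : Int) - n) % 7 ∧ ((j : Int) - n) % 7 < 7 := ⟨Int.emod_nonneg _ (by omega), Int.emod_lt_of_pos _ (by omega)⟩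
      have h2b : 0 ≤ n % 7 ∧ n % 7 < 7 := ⟨Int.emod_nonneg _ (by omega), Int.emod_lt_of_pos _ (by omega)⟩
      constructor <;> intro h <;> omega
  · by_cases h3 : PySem.Chars.len fi = 3
    · simp only [parsedowTok, tokRanges, eq_true h3, eq_false h1, if_true, if_false]
      cases h0 : PySem.Int.ofChars? [fi.getD 0 ' '] with
      | none => simp
      | some a =>
        cases h2 : PySem.Int.ofChars? [fi.getD 2 ' '] with
        | none => simp
        | some b =>
          simp only [List.any_cons, List.any_nil, Bool.or_false]
          rw [rangeStep ((b + 1) - a).toNat a (b + 1) rfl t ht j hj]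
          congr 1
          simp only [covP]
          rw [decide_eq_decide]
          constructor <;> intro h <;> omega
    · rw [PySem.Chars.len_eq] at h1 h3
      simp [parsedowTok, tokRanges, h1, h3]

theorem foldLen (toks : List (List Char)) : ∀ (t : List Bool),
    (toks.foldl parsedowTok t).length = t.length := by
  induction toks with
  | nil => intro t; rfl
  | cons x xs ih => intro t; rw [List.foldl_cons, ih, tokLen]

theorem mainStep (toks : List (List Char)) : ∀ (t : List Bool), t.length = 7 → ∀ (j : Nat), j < 7 →
    (toks.foldl parsedowTok t)[j]! = (t[j]! || (toks.flatMap tokRanges).any (covP j)) := by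
  induction toks with
  | nil => intro t ht j hj; simp
  | cons x xs ih =>
    intro t ht j hj
    rw [List.foldl_cons, ih _ (by rw [tokLen, ht]) j hj, tokStep t ht x j hj]
    simp [Bool.or_assoc]

-- ===== VERDICT (by name: the statement is the Claim_ definition above) =====
theorem parsedow_spec : Claim_equal_parsedow := by
  intro instr _ _
  unfold Spec_parsedow parsedow parsedow_alt
  rw [PySem.List.foldl_append_eq_flatMap, List.nil_append]
  set toks := PySem.Chars.splitOn instr.toList [','] with htoks
  have hlen : (PySem.List.pyRange 0 7 1).length = 7 := by
    rw [PySem.List.length_pyRange_one]; rfl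
  apply List.ext_getElem!
  · rw [foldLen, List.length_map, hlen]; rfl
  · intro n
    by_cases hn : n < 7
    · rw [mainStep toks (List.replicate 7 false) (by simp) n hn,
        getElem!_pos ((PySem.List.pyRange 0 7 1).map _) n (by rw [List.length_map, hlen]; exact hn),
        List.getElem_map, PySem.List.getElem_pyRange_one,
        getElem!_pos (List.replicate 7 false) n (by simpa using hn)]
      simp only [List.getElem_replicate, Bool.false_or, zero_add]
      rfl
    · rw [getElem!_neg _ n (by rw [foldLen]; simpa using hn),
        getElem!_neg _ n (by rw [List.length_map, hlen]; exact hn)]
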